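-- pv_equiv track=rewrite | github.com/Hafi-Ansari/Web-Scraping-Leetcode | test.py | process_problem_description
-- ===== SOURCE A (Python) =====
-- def process_problem_description(description):
--     parts = description.split("\n")
--     examples = []
--     example = []
--     for part in parts:
--         if part.startswith("Example"):
--             if example:
--                 examples.append("\n".join(example))
--             example = [part]
--         else:
--             example.append(part)
--     if example:
--         examples.append("\n".join(example))
--     return examples
-- ===== SOURCE B (Python) =====
-- def process_problem_description(description):
--     lines = description.split("\n")
--     n = len(lines)
--
--     def next_example(i):
--         while i < n and not lines[i].startswith("Example"):
--             i += 1
--         return i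
--
--     blocks = []
--     j = next_example(0)
--     if j > 0:
--         blocks.append("\n".join(lines[:j]))
--     while j < n:
--         k = next_example(j + 1)
--         blocks.append("\n".join(lines[j:k]))
--         j = k
--     return blocks
-- ===== Notes on version B (the rewrite author's own statement) =====
-- stated objective: alternative
-- what changed: Replaces A's per-line accumulator-with-flush fold by a two-pointer scan: an index helper finds the next 'Example' line and each block is emitted as one slice lines[j:k], with the preamble slice emitted only when non-empty.
import Mathlib
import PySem

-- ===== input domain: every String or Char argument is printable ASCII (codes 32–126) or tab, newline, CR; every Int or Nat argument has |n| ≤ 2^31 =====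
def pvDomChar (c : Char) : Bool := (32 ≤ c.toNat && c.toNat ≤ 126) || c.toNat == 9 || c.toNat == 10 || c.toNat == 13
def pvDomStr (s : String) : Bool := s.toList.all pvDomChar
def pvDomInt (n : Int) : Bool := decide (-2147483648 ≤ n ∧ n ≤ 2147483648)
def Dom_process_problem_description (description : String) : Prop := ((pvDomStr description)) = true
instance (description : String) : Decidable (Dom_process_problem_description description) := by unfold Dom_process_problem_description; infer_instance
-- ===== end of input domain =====

-- B replaces A's per-line accumulator-with-flush loop by a two-pointer scan that
-- slices out each block between consecutive "Example" lines (objective: alternative).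

-- ===== PORT A =====
-- one step of A's for-loop: state = (examples, example)
def aStep (st : List String × List String) (part : String) : List String × List String :=
  if PySem.Str.startswith part "Example" then
    (if st.2 ≠ [] then st.1 ++ [PySem.Str.join "\n" st.2] else st.1, [part])
  else
    (st.1, st.2 ++ [part])

def process_problem_description (description : String) : List String :=
  -- description.split("\n"): sep is the non-empty literal "\n", so split? is always `some`
  let parts := (PySem.Str.split? description "\n").getD []
  let st := parts.foldl aStep ([], [])
  if st.2 ≠ [] then st.1 ++ [PySem.Str.join "\n" st.2] else st.1

-- ===== PORT B =====
-- Source B's next_example(i): first index ≥ i whose line starts with "Example" (or n)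
def nextExample (lines : List String) (n : Nat) (i : Nat) : Nat :=
  if i < n ∧ ¬ (PySem.Str.startswith (lines.getD i "") "Example" = true) then
    nextExample lines n (i + 1)
  else i
termination_by n - i
decreasing_by omega

theorem nextExample_ge (lines : List String) (n i : Nat) : i ≤ nextExample lines n i := by
  fun_induction nextExample lines n i <;> omega

-- Source B's while-loop over j, appending one joined slice per block
def bLoop (lines : List String) (n : Nat) (j : Nat) (blocks : List String) : List String :=
  if j < n then
    let k := nextExample lines n (j + 1)
    bLoop lines n k
      (blocks ++ [PySem.Str.join "\n" (PySem.List.slice lines (some (j : Int)) (some (k : Int)))])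
  else blocks
termination_by n - j
decreasing_by have := nextExample_ge lines n (j + 1); omega

def process_problem_description_alt (description : String) : List String :=
  let lines := (PySem.Str.split? description "\n").getD []
  let n := lines.length
  let j := nextExample lines n 0
  let blocks :=
    if 0 < j then [PySem.Str.join "\n" (PySem.List.slice lines none (some (j : Int)))] else []
  bLoop lines n j blocks

-- ===== PRECONDITION & SPEC =====
def Spec_process_problem_description (description : String) (out : List String) : Prop := out = process_problem_description_alt description
instance (description : String) (out : List String) : Decidable (Spec_process_problem_description description out) := by unfold Spec_process_problem_description; infer_instance

-- ===== CLAIM (what is proved, stated in full; the proofs are below) =====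
def Claim_equal_process_problem_description : Prop := ∀ (description : String), Dom_process_problem_description description → Spec_process_problem_description description (process_problem_description description)

-- ===== LEMMAS AND PROOFS =====

-- "line is not an Example header"
def notEx (l : String) : Bool := !(PySem.Str.startswith l "Example")

theorem aStep_ex {l : String} (h : notEx l = false) (st : List String × List String) :
    aStep st l = (if st.2 ≠ [] then st.1 ++ [PySem.Str.join "\n" st.2] else st.1, [l]) := by
  have h' := h
  unfold notEx at h'
  rw [Bool.not_eq_false'] at h'
  simp only [aStep, h', if_true]

theorem aStep_ne {l : String} (h : notEx l = true) (st : List String × List String) :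
    aStep st l = (st.1, st.2 ++ [l]) := by
  have h' := h
  unfold notEx at h'
  rw [Bool.not_eq_true'] at h'
  simp only [aStep, h', Bool.false_eq_true, if_false]

-- common normal form: the joined blocks after the (possibly empty) preamble;
-- argument is a suffix of the line list starting at an "Example" line (or empty)
def chunksJ : List String → List String
  | [] => []
  | l :: ls =>
      PySem.Str.join "\n" (l :: ls.takeWhile notEx) :: chunksJ (ls.dropWhile notEx)
termination_by ls => ls.length
decreasing_by
  simp only [List.length_cons]
  exact Nat.lt_succ_of_le (List.length_dropWhile_le notEx _)

def specJ (lines : List String) : List String :=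
  (if lines.takeWhile notEx = [] then [] else [PySem.Str.join "\n" (lines.takeWhile notEx)])
    ++ chunksJ (lines.dropWhile notEx)

-- generic list facts specialised to notEx
theorem dropWhile_eq_drop_len (l : List String) :
    l.dropWhile notEx = l.drop (l.takeWhile notEx).length := by
  induction l with
  | nil => rfl
  | cons a l ih => by_cases h : notEx a <;> simp [h, ih]

theorem take_len_takeWhile (l : List String) :
    l.take (l.takeWhile notEx).length = l.takeWhile notEx := by
  induction l with
  | nil => rfl
  | cons a l ih =>
    by_cases h : notEx a
    · simp [h, List.take_succ_cons, ih]
    · simp [h]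

-- ===== A-side: the fold equals specJ =====
theorem aFold_char (ls : List String) : ∀ (exs cur : List String), cur ≠ [] →
    (let st := ls.foldl aStep (exs, cur);
     if st.2 ≠ [] then st.1 ++ [PySem.Str.join "\n" st.2] else st.1)
    = exs ++ PySem.Str.join "\n" (cur ++ ls.takeWhile notEx) :: chunksJ (ls.dropWhile notEx) := by
  induction ls with
  | nil => intro exs cur hc; simp [hc, chunksJ]
  | cons l ls ih =>
    intro exs cur hc
    by_cases h1 : notEx l
    · simp only [List.foldl_cons, aStep_ne h1]
      rw [ih exs (cur ++ [l]) (by simp)]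
      simp [h1]
    · have h1 : notEx l = false := by simpa using h1
      simp only [List.foldl_cons, aStep_ex h1, hc, ne_eq, not_false_eq_true, if_true]
      rw [ih (exs ++ [PySem.Str.join "\n" cur]) [l] (by simp)]
      simp [h1, chunksJ]

theorem a_eq_specJ (lines : List String) :
    (let st := lines.foldl aStep ([], []);
     if st.2 ≠ [] then st.1 ++ [PySem.Str.join "\n" st.2] else st.1) = specJ lines := by
  cases lines with
  | nil => simp [specJ, chunksJ]
  | cons l ls =>
    have hstep : aStep (([] : List String), ([] : List String)) l = ([], [l]) := by
      by_cases h1 : notEx l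
      · rw [aStep_ne h1]; rfl
      · rw [aStep_ex (by simpa using h1)]; simp
    simp only [List.foldl_cons, hstep]
    rw [aFold_char ls [] [l] (by simp)]
    by_cases h1 : notEx l
    · simp [specJ, h1]
    · have h1 : notEx l = false := by simpa using h1
      simp [specJ, h1, chunksJ]

-- ===== B-side: the scan equals specJ =====
theorem nextExample_char (lines : List String) (i : Nat) :
    nextExample lines lines.length i = i + ((lines.drop i).takeWhile notEx).length := by
  fun_induction nextExample lines lines.length i with
  | case1 i h ih =>
    obtain ⟨hi, hne⟩ := h
    have hd : lines.drop i = lines[i] :: lines.drop (i + 1) := List.drop_eq_getElem_cons hi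
    have hg : lines.getD i "" = lines[i] := by
      rw [List.getD_eq_getElem?_getD, List.getElem?_eq_getElem hi]; rfl
    have hb : PySem.Str.startswith (lines.getD i "") "Example" = false :=
      Bool.eq_false_iff.mpr hne
    have h1 : notEx lines[i] = true := by
      rw [← hg]; unfold notEx; rw [hb]; rfl
    rw [ih, hd, List.takeWhile_cons, h1]
    simp; omega
  | case2 i h =>
    rcases Classical.em (i < lines.length) with hi | hi
    · have hd : lines.drop i = lines[i] :: lines.drop (i + 1) := List.drop_eq_getElem_cons hi
      have hg : lines.getD i "" = lines[i] := by
        rw [List.getD_eq_getElem?_getD, List.getElem?_eq_getElem hi]; rfl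
      have hne : PySem.Str.startswith (lines.getD i "") "Example" = true := by
        by_contra hc; exact h ⟨hi, hc⟩
      have h1 : notEx lines[i] = false := by
        rw [← hg]; unfold notEx; rw [hne]; rfl
      rw [hd, List.takeWhile_cons, h1]; simp
    · rw [List.drop_eq_nil_of_le (by omega)]; simp

theorem bLoop_char (lines : List String) (j : Nat) (acc : List String) :
    bLoop lines lines.length j acc = acc ++ chunksJ (lines.drop j) := by
  fun_induction bLoop lines lines.length j acc with
  | case1 j acc hj k ih =>
    have hd : lines.drop j = lines[j] :: lines.drop (j + 1) := List.drop_eq_getElem_cons hj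
    have hk : k = j + 1 + ((lines.drop (j + 1)).takeWhile notEx).length :=
      nextExample_char lines (j + 1)
    have hslice : PySem.List.slice lines (some (j : Int)) (some (k : Int))
        = lines[j] :: (lines.drop (j + 1)).takeWhile notEx := by
      rw [PySem.List.slice_natCast, hk]
      have he : (j + 1 + ((lines.drop (j + 1)).takeWhile notEx).length) - j
          = ((lines.drop (j + 1)).takeWhile notEx).length + 1 := by omega
      rw [he, hd, List.take_succ_cons, take_len_takeWhile]
    have hdropk : lines.drop k = (lines.drop (j + 1)).dropWhile notEx := by
      rw [hk, dropWhile_eq_drop_len, List.drop_drop, Nat.add_comm]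
    have hch : chunksJ (lines.drop j)
        = PySem.Str.join "\n" (lines[j] :: (lines.drop (j + 1)).takeWhile notEx)
          :: chunksJ ((lines.drop (j + 1)).dropWhile notEx) := by
      rw [hd, chunksJ]
    rw [ih, hslice, hdropk, hch]
    simp
  | case2 j acc hj =>
    rw [List.drop_eq_nil_of_le (by omega)]
    simp [chunksJ]

theorem b_eq_specJ (lines : List String) :
    bLoop lines lines.length (nextExample lines lines.length 0)
      (if 0 < nextExample lines lines.length 0 then
        [PySem.Str.join "\n" (PySem.List.slice lines none
          (some ((nextExample lines lines.length 0 : Nat) : Int)))]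
       else []) = specJ lines := by
  have hj : nextExample lines lines.length 0 = (lines.takeWhile notEx).length := by
    rw [nextExample_char]; simp
  rw [bLoop_char]
  by_cases h0 : 0 < nextExample lines lines.length 0
  · have hne : lines.takeWhile notEx ≠ [] := by
      intro hc; rw [hj, hc] at h0; simp at h0
    rw [if_pos h0, PySem.List.slice_to_natCast, hj, take_len_takeWhile,
      ← dropWhile_eq_drop_len]
    simp [specJ, hne]
  · have hemp : lines.takeWhile notEx = [] := by
      rw [hj] at h0
      exact List.eq_nil_of_length_eq_zero (by omega)
    rw [if_neg h0, hj, hemp]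
    simp [specJ, hemp, dropWhile_eq_drop_len, List.drop_zero]

-- ===== VERDICT (by name: the statement is the Claim_ definition above) =====
theorem process_problem_description_spec : Claim_equal_process_problem_description := by
  intro description _
  unfold Spec_process_problem_description process_problem_description process_problem_description_alt
  rw [a_eq_specJ, ← b_eq_specJ]
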